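-- pv_equiv track=rewrite | github.com/wesleyd/aoc2017 | day24b.py | longests
-- ===== SOURCE A (Python) =====
-- import math
--
-- def longests(bridges):
--     m = -math.inf
--     ret = []
--     for bridge in bridges:
--         l = len(bridge)
--         if l > m:
--             m = l
--             ret = [bridge]
--         elif l == m:
--             ret.append(bridge)
--     return ret
-- ===== SOURCE B (Python) =====
-- def longests(bridges):
--     if not bridges:
--         return []
--     m = max(len(b) for b in bridges)
--     return [b for b in bridges if len(b) == m]
-- ===== Notes on version B (the rewrite author's own statement) =====
-- stated objective: simpler
-- what changed: Replaces the interleaved max-tracking accumulator (reset/append per element) with two sequential passes: compute the maximum length, then filter the bridges of that length.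
import Mathlib
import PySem

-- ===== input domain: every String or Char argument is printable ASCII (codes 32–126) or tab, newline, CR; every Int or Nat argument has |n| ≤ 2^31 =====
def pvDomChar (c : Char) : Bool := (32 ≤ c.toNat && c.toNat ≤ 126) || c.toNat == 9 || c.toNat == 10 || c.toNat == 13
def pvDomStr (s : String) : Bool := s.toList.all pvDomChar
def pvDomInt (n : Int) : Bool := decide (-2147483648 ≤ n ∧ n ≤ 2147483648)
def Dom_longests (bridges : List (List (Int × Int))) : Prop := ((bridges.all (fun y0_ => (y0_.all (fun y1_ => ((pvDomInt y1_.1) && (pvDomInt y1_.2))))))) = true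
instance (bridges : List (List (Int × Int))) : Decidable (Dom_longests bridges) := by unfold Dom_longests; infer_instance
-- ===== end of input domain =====

-- B replaces A's interleaved max-tracking accumulator with two sequential passes
-- (find the maximum length, then filter bridges of that length): simpler decomposition.


-- ===== PORT A =====
-- m = -math.inf is represented as 'none' (any length compares greater than it);
-- the loop state (m, ret) is threaded by a left fold over bridges.
def longestsStep (acc : Option Nat × List (List (Int × Int))) (bridge : List (Int × Int)) :
    Option Nat × List (List (Int × Int)) :=
  let l := bridge.length
  match acc.1 with
  | none => (some l, [bridge])
  | some m =>
    if l > m then (some l, [bridge])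
    else if l = m then (some m, acc.2 ++ [bridge])
    else acc

def longests (bridges : List (List (Int × Int))) : List (List (Int × Int)) :=
  (bridges.foldl longestsStep (none, [])).2

-- ===== PORT B =====
def longests_alt (bridges : List (List (Int × Int))) : List (List (Int × Int)) :=
  match bridges with
  | [] => []
  | b :: t =>
    let m := (t.map List.length).foldl max b.length  -- max(len(b) for b in bridges)
    bridges.filter (fun br => br.length == m)

-- ===== PRECONDITION & SPEC =====
def Spec_longests (bridges : List (List (Int × Int))) (out : List (List (Int × Int))) : Prop := out = longests_alt bridges
instance (bridges : List (List (Int × Int))) (out : List (List (Int × Int))) : Decidable (Spec_longests bridges out) := by unfold Spec_longests; infer_instance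

-- ===== CLAIM (what is proved, stated in full; the proofs are below) =====
def Claim_equal_longests : Prop := ∀ (bridges : List (List (Int × Int))), Dom_longests bridges → Spec_longests bridges (longests bridges)

-- ===== LEMMAS AND PROOFS =====
lemma le_foldl_max_self' (m : Nat) (l : List Nat) : m ≤ l.foldl max m := by
  induction l generalizing m with
  | nil => simp
  | cons a t ih => simpa using le_trans (le_max_left m a) (ih (max m a))

lemma longests_aux (l : List (List (Int × Int))) (m : Nat) (ret : List (List (Int × Int))) :
    l.foldl longestsStep (some m, ret) =
      (some ((l.map List.length).foldl max m),
       (if (l.map List.length).foldl max m = m then ret else []) ++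
         l.filter (fun br => br.length == (l.map List.length).foldl max m)) := by
  induction l generalizing m ret with
  | nil => simp
  | cons b t ih =>
    simp only [List.foldl_cons, List.map_cons, List.filter_cons]
    by_cases h1 : b.length > m
    · have hstep : longestsStep (some m, ret) b = (some b.length, [b]) := by
        simp [longestsStep, h1]
      rw [hstep, ih]
      have hmax : max m b.length = b.length := by omega
      simp only [hmax]
      set M := (t.map List.length).foldl max b.length with hMdef
      have hbM : b.length ≤ M := le_foldl_max_self' ..
      have hMm : M ≠ m := by omega
      simp only [if_neg hMm, List.nil_append]
      by_cases h2 : b.length = M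
      · simp [h2]
      · have : (b.length == M) = false := by simp [h2]
        simp [this]
        omega
    · by_cases h2 : b.length = m
      · have hstep : longestsStep (some m, ret) b = (some m, ret ++ [b]) := by
          simp [longestsStep, h2]
        rw [hstep, ih]
        have hmax : max m b.length = m := by omega
        simp only [hmax]
        set M := (t.map List.length).foldl max m with hMdef
        by_cases h3 : M = m
        · have : (b.length == M) = true := by simp [h2, h3]
          simp [h3, h2, List.append_assoc]
        · have : (b.length == M) = false := by simp; omega
          simp [h3, this]
      · have hstep : longestsStep (some m, ret) b = (some m, ret) := by
          simp [longestsStep, h2]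
          omega
        rw [hstep, ih]
        have hmax : max m b.length = m := by omega
        simp only [hmax]
        set M := (t.map List.length).foldl max m with hMdef
        have hmM : m ≤ M := le_foldl_max_self' ..
        have : (b.length == M) = false := by simp; omega
        simp [this]

-- ===== VERDICT (by name: the statement is the Claim_ definition above) =====
theorem longests_spec : Claim_equal_longests := by
  intro bridges _
  unfold Spec_longests longests longests_alt
  cases bridges with
  | nil => simp
  | cons b t =>
    simp only [List.foldl_cons]
    have hstep : longestsStep (none, []) b = (some b.length, [b]) := by
      simp [longestsStep]
    rw [hstep, longests_aux]
    set M := (t.map List.length).foldl max b.length with hMdef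
    have hbM : b.length ≤ M := le_foldl_max_self' ..
    simp only [List.filter_cons]
    by_cases h : M = b.length
    · have : (b.length == M) = true := by simp [h]
      simp [h]
    · have : (b.length == M) = false := by simp; omega
      simp [h]
      omega
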